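-- pv_equiv track=rewrite | github.com/v8oholic/groovekraft | mb_modules/mb_matcher.py | mb_normalize_format
-- ===== SOURCE A (Python) =====
-- def parse_discogs_format(primary_type, secondary_types):
--     if primary_type == 'Vinyl':
--         if 'EP' in secondary_types and '7"' in secondary_types:
--             return '7" EP', 'single'
--         elif 'EP' in secondary_types and '12"' in secondary_types:
--             return '12" EP', 'single'
--         elif '12"' in secondary_types:
--             return '12" Single', 'single'
--         elif '7"' in secondary_types:
--             return '7" Single', 'single'
--         elif 'Compilation' in secondary_types:
--             return 'LP Compilation', 'album'
--         elif 'LP' in secondary_types: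
--             return 'LP', 'album'
--         else:
--             return '?', '?'
--
--     elif primary_type == 'CD':
--         if 'Mini' in secondary_types:
--             return 'CD 3" Mini Single', 'single'
--         elif 'Single' in secondary_types or 'Maxi-Single' in secondary_types:
--             return 'CD Single', 'single'
--         elif 'EP' in secondary_types:
--             return 'CD EP', 'single'
--         elif 'HDCD' in secondary_types and 'Album' in secondary_types:
--             return 'CD HDCD Album', 'album'
--         elif 'LP' in secondary_types or 'Album' in secondary_types:
--             return 'CD Album', 'album'
--         elif 'Mini-Album' in secondary_types:
--             return 'CD Mini-Album', 'album'
--         elif 'Compilation' in secondary_types: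
--             return 'CD Compilation', 'album'
--         else:
--             return 'CD Single', 'single'
--
--     elif primary_type == 'Flexi-disc':
--         if '7"' in secondary_types:
--             return '7" flexi-disc', 'single'
--         return '?', '?'
--
--     elif primary_type == 'Box Set':
--         if '12"' in secondary_types:
--             return '12" Singles Box Set', 'single'
--         elif '7"' in secondary_types:
--             return '7" Singles Box Set', 'single'
--         elif 'LP' in secondary_types:
--             return 'LP Box Set', 'album'
--         elif 'EP' in secondary_types:
--             return 'EP Box Set', 'single'
--         elif 'Single' in secondary_types or 'Maxi-Single' in secondary_types:
--             return 'Singles Box Set', 'single'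
--         return 'Box Set', 'Other'
--
--     return '?', '?'
--
-- def mb_normalize_format(discogs_format):
--     if not discogs_format:
--         raise Exception('format error')
--
--     parts = discogs_format.split(':')
--     primary_type = parts[0].strip()
--     secondary_types = [p.strip() for p in parts[1].split(',')] if len(parts) > 1 else []
--
--     fmt, mb_primary_type = parse_discogs_format(primary_type, secondary_types)
--     mb_secondary_type = f'{primary_type} 12"' if '12"' in secondary_types else primary_type
--
--     return fmt, mb_primary_type, primary_type, mb_secondary_type
-- ===== SOURCE B (Python) =====
-- # Data-driven rule table replacing the nested if/elif cascades.
--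
-- # Each rule: (primary_type, groups, (fmt, mb_primary_type)).
-- # A rule fires when every group has at least one member among the secondary
-- # types; an empty groups list always fires (the per-primary default).
-- _RULES = [
--     ('Vinyl', [['EP'], ['7"']], ('7" EP', 'single')),
--     ('Vinyl', [['EP'], ['12"']], ('12" EP', 'single')),
--     ('Vinyl', [['12"']], ('12" Single', 'single')),
--     ('Vinyl', [['7"']], ('7" Single', 'single')),
--     ('Vinyl', [['Compilation']], ('LP Compilation', 'album')),
--     ('Vinyl', [['LP']], ('LP', 'album')),
--     ('Vinyl', [], ('?', '?')),
--     ('CD', [['Mini']], ('CD 3" Mini Single', 'single')),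
--     ('CD', [['Single', 'Maxi-Single']], ('CD Single', 'single')),
--     ('CD', [['EP']], ('CD EP', 'single')),
--     ('CD', [['HDCD'], ['Album']], ('CD HDCD Album', 'album')),
--     ('CD', [['LP', 'Album']], ('CD Album', 'album')),
--     ('CD', [['Mini-Album']], ('CD Mini-Album', 'album')),
--     ('CD', [['Compilation']], ('CD Compilation', 'album')),
--     ('CD', [], ('CD Single', 'single')),
--     ('Flexi-disc', [['7"']], ('7" flexi-disc', 'single')),
--     ('Flexi-disc', [], ('?', '?')),
--     ('Box Set', [['12"']], ('12" Singles Box Set', 'single')),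
--     ('Box Set', [['7"']], ('7" Singles Box Set', 'single')),
--     ('Box Set', [['LP']], ('LP Box Set', 'album')),
--     ('Box Set', [['EP']], ('EP Box Set', 'single')),
--     ('Box Set', [['Single', 'Maxi-Single']], ('Singles Box Set', 'single')),
--     ('Box Set', [], ('Box Set', 'Other')),
-- ]
--
--
-- def mb_normalize_format(discogs_format):
--     if not discogs_format:
--         raise Exception('format error')
--
--     parts = discogs_format.split(':')
--     primary_type = parts[0].strip()
--     secondary_types = [p.strip() for p in parts[1].split(',')] if len(parts) > 1 else []
--
--     fmt, mb_primary_type = ('?', '?')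
--     for primary, groups, result in _RULES:
--         if primary == primary_type and all(
--                 any(t in secondary_types for t in g) for g in groups):
--             fmt, mb_primary_type = result
--             break
--
--     mb_secondary_type = f'{primary_type} 12"' if '12"' in secondary_types else primary_type
--     return fmt, mb_primary_type, primary_type, mb_secondary_type
-- ===== Notes on version B (the rewrite author's own statement) =====
-- stated objective: idiomatic
-- what changed: Replaced the nested per-primary-type if/elif cascades with a declarative ordered rule table (primary, required secondary-type groups, result) scanned by one generic first-match interpreter loop.
import Mathlib
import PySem

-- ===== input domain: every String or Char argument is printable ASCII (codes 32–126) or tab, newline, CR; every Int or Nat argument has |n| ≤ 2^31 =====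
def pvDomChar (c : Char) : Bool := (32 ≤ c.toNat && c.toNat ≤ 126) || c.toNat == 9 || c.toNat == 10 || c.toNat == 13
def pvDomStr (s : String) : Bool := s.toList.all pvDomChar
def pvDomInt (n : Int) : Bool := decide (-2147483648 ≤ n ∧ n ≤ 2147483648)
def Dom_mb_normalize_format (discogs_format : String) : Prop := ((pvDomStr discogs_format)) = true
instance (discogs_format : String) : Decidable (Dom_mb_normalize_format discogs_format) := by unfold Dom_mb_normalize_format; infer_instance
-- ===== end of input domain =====

-- B replaces A's nested if/elif cascades with a declarative rule table scanned by one
-- first-match interpreter loop (objective: idiomatic/data-driven); both raise on "" (excluded by Pre_).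

-- ===== PORT A =====
def parse_discogs_format (primary_type : String) (secondary_types : List String) : String × String :=
  if primary_type = "Vinyl" then
    if "EP" ∈ secondary_types ∧ "7\"" ∈ secondary_types then ("7\" EP", "single")
    else if "EP" ∈ secondary_types ∧ "12\"" ∈ secondary_types then ("12\" EP", "single")
    else if "12\"" ∈ secondary_types then ("12\" Single", "single")
    else if "7\"" ∈ secondary_types then ("7\" Single", "single")
    else if "Compilation" ∈ secondary_types then ("LP Compilation", "album")
    else if "LP" ∈ secondary_types then ("LP", "album")
    else ("?", "?")
  else if primary_type = "CD" then
    if "Mini" ∈ secondary_types then ("CD 3\" Mini Single", "single")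
    else if "Single" ∈ secondary_types ∨ "Maxi-Single" ∈ secondary_types then ("CD Single", "single")
    else if "EP" ∈ secondary_types then ("CD EP", "single")
    else if "HDCD" ∈ secondary_types ∧ "Album" ∈ secondary_types then ("CD HDCD Album", "album")
    else if "LP" ∈ secondary_types ∨ "Album" ∈ secondary_types then ("CD Album", "album")
    else if "Mini-Album" ∈ secondary_types then ("CD Mini-Album", "album")
    else if "Compilation" ∈ secondary_types then ("CD Compilation", "album")
    else ("CD Single", "single")
  else if primary_type = "Flexi-disc" then
    if "7\"" ∈ secondary_types then ("7\" flexi-disc", "single")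
    else ("?", "?")
  else if primary_type = "Box Set" then
    if "12\"" ∈ secondary_types then ("12\" Singles Box Set", "single")
    else if "7\"" ∈ secondary_types then ("7\" Singles Box Set", "single")
    else if "LP" ∈ secondary_types then ("LP Box Set", "album")
    else if "EP" ∈ secondary_types then ("EP Box Set", "single")
    else if "Single" ∈ secondary_types ∨ "Maxi-Single" ∈ secondary_types then ("Singles Box Set", "single")
    else ("Box Set", "Other")
  else ("?", "?")

def mb_normalize_format (discogs_format : String) : String × String × String × String :=
  if discogs_format = "" then ("?", "?", "", "")  -- Python raises Exception here; excluded by Pre_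
  else
    let parts := (PySem.Str.split? discogs_format ":").getD []
    let primary_type := PySem.Str.strip (PySem.List.pyGetD parts 0 "")
    let secondary_types :=
      if parts.length > 1 then ((PySem.Str.split? (PySem.List.pyGetD parts 1 "") ",").getD []).map PySem.Str.strip
      else []
    let r := parse_discogs_format primary_type secondary_types
    let mb_secondary_type :=
      if "12\"" ∈ secondary_types then primary_type ++ " 12\"" else primary_type
    (r.1, r.2, primary_type, mb_secondary_type)

-- ===== PORT B =====
-- a rule fires when every group has some member among the secondary types
def ruleMatches (secondary_types : List String) (groups : List (List String)) : Bool :=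
  groups.all (fun g => g.any (fun t => secondary_types.contains t))

def rulesTable : List (String × List (List String) × (String × String)) :=
  [ ("Vinyl", [["EP"], ["7\""]], ("7\" EP", "single")),
    ("Vinyl", [["EP"], ["12\""]], ("12\" EP", "single")),
    ("Vinyl", [["12\""]], ("12\" Single", "single")),
    ("Vinyl", [["7\""]], ("7\" Single", "single")),
    ("Vinyl", [["Compilation"]], ("LP Compilation", "album")),
    ("Vinyl", [["LP"]], ("LP", "album")),
    ("Vinyl", [], ("?", "?")),
    ("CD", [["Mini"]], ("CD 3\" Mini Single", "single")),
    ("CD", [["Single", "Maxi-Single"]], ("CD Single", "single")),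
    ("CD", [["EP"]], ("CD EP", "single")),
    ("CD", [["HDCD"], ["Album"]], ("CD HDCD Album", "album")),
    ("CD", [["LP", "Album"]], ("CD Album", "album")),
    ("CD", [["Mini-Album"]], ("CD Mini-Album", "album")),
    ("CD", [["Compilation"]], ("CD Compilation", "album")),
    ("CD", [], ("CD Single", "single")),
    ("Flexi-disc", [["7\""]], ("7\" flexi-disc", "single")),
    ("Flexi-disc", [], ("?", "?")),
    ("Box Set", [["12\""]], ("12\" Singles Box Set", "single")),
    ("Box Set", [["7\""]], ("7\" Singles Box Set", "single")),
    ("Box Set", [["LP"]], ("LP Box Set", "album")),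
    ("Box Set", [["EP"]], ("EP Box Set", "single")),
    ("Box Set", [["Single", "Maxi-Single"]], ("Singles Box Set", "single")),
    ("Box Set", [], ("Box Set", "Other")) ]

-- the for-loop with break: first matching rule's result, default ('?', '?')
def findRule : List (String × List (List String) × (String × String)) → String → List String → String × String
  | [], _, _ => ("?", "?")
  | (p, groups, res) :: rest, primary_type, secondary_types =>
    if p = primary_type ∧ ruleMatches secondary_types groups = true then res
    else findRule rest primary_type secondary_types

def mb_normalize_format_alt (discogs_format : String) : String × String × String × String :=
  if discogs_format = "" then ("?", "?", "", "")  -- Python B raises Exception here; excluded by Pre_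
  else
    let parts := (PySem.Str.split? discogs_format ":").getD []
    let primary_type := PySem.Str.strip (PySem.List.pyGetD parts 0 "")
    let secondary_types :=
      if parts.length > 1 then ((PySem.Str.split? (PySem.List.pyGetD parts 1 "") ",").getD []).map PySem.Str.strip
      else []
    let r := findRule rulesTable primary_type secondary_types
    let mb_secondary_type :=
      if "12\"" ∈ secondary_types then primary_type ++ " 12\"" else primary_type
    (r.1, r.2, primary_type, mb_secondary_type)

-- ===== PRECONDITION & SPEC =====
-- Pre_ excludes only the empty string, on which A (and B) raise an Exception.
def Pre_mb_normalize_format (discogs_format : String) : Prop := discogs_format ≠ ""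
instance (discogs_format : String) : Decidable (Pre_mb_normalize_format discogs_format) := by unfold Pre_mb_normalize_format; infer_instance
def pvWitness_mb_normalize_format : String := "Vinyl: LP, Compilation"

def Spec_mb_normalize_format (discogs_format : String) (out : String × String × String × String) : Prop := out = mb_normalize_format_alt discogs_format
instance (discogs_format : String) (out : String × String × String × String) : Decidable (Spec_mb_normalize_format discogs_format out) := by unfold Spec_mb_normalize_format; infer_instance

-- ===== CLAIM =====
def Claim_equal_mb_normalize_format : Prop := ∀ (discogs_format : String), Dom_mb_normalize_format discogs_format → Pre_mb_normalize_format discogs_format → Spec_mb_normalize_format discogs_format (mb_normalize_format discogs_format)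

-- ===== LEMMAS AND PROOFS =====

-- the rule table computes exactly A's cascade, one lemma per primary type
set_option maxHeartbeats 4000000 in
theorem fr_vinyl (sec : List String) :
    findRule rulesTable "Vinyl" sec = parse_discogs_format "Vinyl" sec := by
  by_cases h0 : "EP" ∈ sec <;>
    by_cases h1 : "7\"" ∈ sec <;>
    by_cases h2 : "12\"" ∈ sec <;>
    by_cases h3 : "Compilation" ∈ sec <;>
    by_cases h4 : "LP" ∈ sec <;>
    simp [rulesTable, findRule, ruleMatches, parse_discogs_format, h0, h1, h2, h3, h4]

set_option maxHeartbeats 4000000 in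
theorem fr_cd (sec : List String) :
    findRule rulesTable "CD" sec = parse_discogs_format "CD" sec := by
  by_cases h0 : "Mini" ∈ sec <;>
    by_cases h1 : "Single" ∈ sec <;>
    by_cases h2 : "Maxi-Single" ∈ sec <;>
    by_cases h3 : "EP" ∈ sec <;>
    by_cases h4 : "HDCD" ∈ sec <;>
    by_cases h5 : "Album" ∈ sec <;>
    by_cases h6 : "LP" ∈ sec <;>
    by_cases h7 : "Mini-Album" ∈ sec <;>
    by_cases h8 : "Compilation" ∈ sec <;>
    simp [rulesTable, findRule, ruleMatches, parse_discogs_format, h0, h1, h2, h3, h4, h5, h6, h7, h8]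

set_option maxHeartbeats 4000000 in
theorem fr_flexi (sec : List String) :
    findRule rulesTable "Flexi-disc" sec = parse_discogs_format "Flexi-disc" sec := by
  by_cases h0 : "7\"" ∈ sec <;>
    simp [rulesTable, findRule, ruleMatches, parse_discogs_format, h0]

set_option maxHeartbeats 4000000 in
theorem fr_box (sec : List String) :
    findRule rulesTable "Box Set" sec = parse_discogs_format "Box Set" sec := by
  by_cases h0 : "12\"" ∈ sec <;>
    by_cases h1 : "7\"" ∈ sec <;>
    by_cases h2 : "LP" ∈ sec <;>
    by_cases h3 : "EP" ∈ sec <;>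
    by_cases h4 : "Single" ∈ sec <;>
    by_cases h5 : "Maxi-Single" ∈ sec <;>
    simp [rulesTable, findRule, ruleMatches, parse_discogs_format, h0, h1, h2, h3, h4, h5]

set_option maxHeartbeats 4000000 in
theorem findRule_eq_parse (p : String) (sec : List String) :
    findRule rulesTable p sec = parse_discogs_format p sec := by
  by_cases h1 : p = "Vinyl"
  · subst h1; exact fr_vinyl sec
  by_cases h2 : p = "CD"
  · subst h2; exact fr_cd sec
  by_cases h3 : p = "Flexi-disc"
  · subst h3; exact fr_flexi sec
  by_cases h4 : p = "Box Set"
  · subst h4; exact fr_box sec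
  simp [rulesTable, findRule, parse_discogs_format, Ne.symm h1, Ne.symm h2, Ne.symm h3, Ne.symm h4, h1, h2, h3, h4]

-- ===== VERDICT =====
theorem mb_normalize_format_spec : Claim_equal_mb_normalize_format := by
  intro s _ hpre
  unfold Spec_mb_normalize_format mb_normalize_format mb_normalize_format_alt
  simp only [if_neg hpre, findRule_eq_parse]
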